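-- pv_equiv track=rewrite | github.com/Simenb123/Utvalg | src/audit_actions/motpost/excel.py | normalize_combo_status_map
-- ===== SOURCE A (Python) =====
-- from typing import Any, Optional
--
-- def normalize_combo_status_map(status_map: Optional[dict[str, str]]) -> dict[str, str]:
--     """Normaliserer statusverdier fra GUI til {combo: outlier/expected/neutral}."""
--
--     if not status_map:
--         return {}
--
--     out: dict[str, str] = {}
--     for combo, raw in status_map.items():
--         s = str(raw or "").strip().lower()
--         if s in {"outlier", "ikke forventet", "not_expected", "not expected"}:
--             out[str(combo)] = "outlier"
--         elif s in {"expected", "forventet"}: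
--             out[str(combo)] = "expected"
--         elif s in {"", "neutral", "umerket", "unmarked"}:
--             out[str(combo)] = "neutral"
--         else:
--             # Ukjent -> behold som neutral
--             out[str(combo)] = "neutral"
--     return out
-- ===== SOURCE B (Python) =====
-- from typing import Optional
--
-- # Sweep-based normalization: initialise every combo to "neutral", then make one
-- # overwriting pass per non-neutral category. Correct because the synonym sets of
-- # the categories are disjoint, so at most one sweep touches a given entry.
-- _CATEGORY_SWEEPS = (
--     ("outlier", ("outlier", "ikke forventet", "not_expected", "not expected")),
--     ("expected", ("expected", "forventet")),
-- )
--
-- def normalize_combo_status_map(status_map: Optional[dict[str, str]]) -> dict[str, str]: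
--     if not status_map:
--         return {}
--     out = {str(combo): "neutral" for combo in status_map}
--     for category, synonyms in _CATEGORY_SWEEPS:
--         for combo, raw in status_map.items():
--             if str(raw or "").strip().lower() in synonyms:
--                 out[str(combo)] = category
--     return out
-- ===== Notes on version B (the rewrite author's own statement) =====
-- stated objective: alternative
-- what changed: Replaces the single pass with a per-item four-way if/elif cascade by a default-everything-to-neutral initialisation followed by one overwriting sweep per non-neutral category (driven by a table of (category, synonyms) pairs); correctness rests on the synonym sets being disjoint.
import Mathlib
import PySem

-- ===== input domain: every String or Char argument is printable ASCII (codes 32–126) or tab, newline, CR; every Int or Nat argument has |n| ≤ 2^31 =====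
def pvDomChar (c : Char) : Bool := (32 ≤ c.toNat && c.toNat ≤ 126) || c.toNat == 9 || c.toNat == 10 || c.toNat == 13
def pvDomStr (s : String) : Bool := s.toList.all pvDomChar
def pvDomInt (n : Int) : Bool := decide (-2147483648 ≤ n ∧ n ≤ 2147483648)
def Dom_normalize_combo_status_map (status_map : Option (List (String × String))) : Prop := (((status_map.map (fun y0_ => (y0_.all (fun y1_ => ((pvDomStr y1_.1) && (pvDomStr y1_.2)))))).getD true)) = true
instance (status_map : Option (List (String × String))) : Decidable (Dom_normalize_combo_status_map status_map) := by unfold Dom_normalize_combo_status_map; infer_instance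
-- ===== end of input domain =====

-- B replaces A's per-item if/elif cascade by default-to-neutral initialisation plus one
-- overwriting sweep per non-neutral category (objective: alternative decomposition, same cost).

-- ===== PORT A =====
def normalize_combo_status_map (status_map : Option (List (String × String))) : List (String × String) :=
  match status_map with
  | none => []
  | some m =>
    if m = [] then []
    else
      (m.foldl (fun out kv =>
        let s := PySem.Str.lower (PySem.Str.strip kv.2)
        if s ∈ (["outlier", "ikke forventet", "not_expected", "not expected"] : List String) then
          out.insert kv.1 "outlier"
        else if s ∈ (["expected", "forventet"] : List String) then
          out.insert kv.1 "expected"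
        else if s ∈ (["", "neutral", "umerket", "unmarked"] : List String) then
          out.insert kv.1 "neutral"
        else
          out.insert kv.1 "neutral") PySem.Dict.empty).items

-- ===== PORT B =====
def pvSweeps : List (String × List String) :=
  [("outlier", ["outlier", "ikke forventet", "not_expected", "not expected"]),
   ("expected", ["expected", "forventet"])]

def normalize_combo_status_map_alt (status_map : Option (List (String × String))) : List (String × String) :=
  match status_map with
  | none => []
  | some m =>
    if m = [] then []
    else
      let out0 := m.foldl (fun d kv => d.insert kv.1 "neutral") PySem.Dict.empty
      (pvSweeps.foldl (fun d cs =>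
        m.foldl (fun d kv =>
          if PySem.Str.lower (PySem.Str.strip kv.2) ∈ cs.2 then d.insert kv.1 cs.1 else d) d)
        out0).items

-- ===== PRECONDITION & SPEC =====
-- Pre_ excludes association lists with duplicate keys: they do not represent any Python
-- dict input (a dict's keys are unique), so neither program is ever run on them.
def Pre_normalize_combo_status_map (status_map : Option (List (String × String))) : Prop :=
  ((status_map.getD []).map Prod.fst).Nodup
instance (status_map : Option (List (String × String))) : Decidable (Pre_normalize_combo_status_map status_map) := by unfold Pre_normalize_combo_status_map; infer_instance

def pvWitness_normalize_combo_status_map : (Option (List (String × String))) :=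
  some [("a", " Forventet "), ("b", "??"), ("c", "not expected")]

def Spec_normalize_combo_status_map (status_map : Option (List (String × String))) (out : List (String × String)) : Prop := out = normalize_combo_status_map_alt status_map
instance (status_map : Option (List (String × String))) (out : List (String × String)) : Decidable (Spec_normalize_combo_status_map status_map out) := by unfold Spec_normalize_combo_status_map; infer_instance

-- ===== CLAIM (what is proved, stated in full; the proofs are below) =====
def Claim_equal_normalize_combo_status_map : Prop := ∀ (status_map : Option (List (String × String))), Dom_normalize_combo_status_map status_map → Pre_normalize_combo_status_map status_map → Spec_normalize_combo_status_map status_map (normalize_combo_status_map status_map)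

-- ===== LEMMAS AND PROOFS =====

-- A's cascade value for one item.
def pvCatA (kv : String × String) : String :=
  let s := PySem.Str.lower (PySem.Str.strip kv.2)
  if s ∈ (["outlier", "ikke forventet", "not_expected", "not expected"] : List String) then "outlier"
  else if s ∈ (["expected", "forventet"] : List String) then "expected"
  else if s ∈ (["", "neutral", "umerket", "unmarked"] : List String) then "neutral"
  else "neutral"

-- A conditional-insert sweep leaves every key it does not mention unchanged.
theorem pvSweep_getD_of_ne (ys : List String) (v : String)
    (l : List (String × String)) (d : PySem.Dict String String) (x : String) (dflt : String)
    (h : ∀ kv ∈ l, kv.1 ≠ x) :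
    (l.foldl (fun d kv =>
        if PySem.Str.lower (PySem.Str.strip kv.2) ∈ ys then d.insert kv.1 v else d) d).getD x dflt
      = d.getD x dflt := by
  induction l generalizing d with
  | nil => rfl
  | cons kv rest ih =>
    simp only [List.foldl_cons]
    rw [ih _ (fun a ha => h a (List.mem_cons_of_mem _ ha))]
    split_ifs with hp
    · exact PySem.Dict.getD_insert_of_ne _ _ _ (fun e => h kv List.mem_cons_self e.symm)
    · rfl

theorem pvInit_getD_of_ne (l : List (String × String)) (d : PySem.Dict String String)
    (x : String) (dflt : String) (h : ∀ kv ∈ l, kv.1 ≠ x) :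
    (l.foldl (fun d kv => d.insert kv.1 "neutral") d).getD x dflt = d.getD x dflt := by
  induction l generalizing d with
  | nil => rfl
  | cons kv rest ih =>
    simp only [List.foldl_cons]
    rw [ih _ (fun a ha => h a (List.mem_cons_of_mem _ ha))]
    exact PySem.Dict.getD_insert_of_ne _ _ _ (fun e => h kv List.mem_cons_self e.symm)

-- A conditional-insert sweep only inserts keys the dict already contains, so keys are kept.
theorem pvSweep_keys (ys : List String) (v : String)
    (l : List (String × String)) (d : PySem.Dict String String)
    (h : ∀ kv ∈ l, d.contains kv.1 = true) :
    (l.foldl (fun d kv =>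
        if PySem.Str.lower (PySem.Str.strip kv.2) ∈ ys then d.insert kv.1 v else d) d).keys
      = d.keys := by
  induction l generalizing d with
  | nil => rfl
  | cons kv rest ih =>
    simp only [List.foldl_cons]
    split_ifs with hp
    · rw [ih _ (fun a ha => by
        rw [PySem.Dict.contains_insert]
        simp [h a (List.mem_cons_of_mem _ ha)])]
      exact PySem.Dict.keys_insert_of_contains _ _ (h kv List.mem_cons_self)
    · exact ih _ (fun a ha => h a (List.mem_cons_of_mem _ ha))

theorem pvInit_keys (l : List (String × String)) :
    (l.foldl (fun d kv => d.insert kv.1 "neutral") (PySem.Dict.empty : PySem.Dict String String)).keys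
      = PySem.Set.ofList (l.map Prod.fst) := by
  have := PySem.Dict.keys_foldl_insert_key l Prod.fst
    (fun (_ : PySem.Dict String String) (_ : String × String) => "neutral") PySem.Dict.empty
  simpa [PySem.Dict.keys_empty, PySem.Set.update, PySem.Set.ofList] using this

-- The per-key value of B's dict is A's cascade value.
theorem pvB_getD (m : List (String × String)) (hnd : (m.map Prod.fst).Nodup)
    (kv : String × String) (hmem : kv ∈ m) :
    ((pvSweeps.foldl (fun d cs =>
        m.foldl (fun d kv =>
          if PySem.Str.lower (PySem.Str.strip kv.2) ∈ cs.2 then d.insert kv.1 cs.1 else d) d)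
      (m.foldl (fun d kv => d.insert kv.1 "neutral") PySem.Dict.empty)).getD kv.1 "")
      = pvCatA kv := by
  obtain ⟨l1, l2, rfl⟩ := List.append_of_mem hmem
  have hnd' := hnd
  simp only [List.map_append, List.map_cons, List.nodup_append, List.nodup_cons] at hnd'
  have h1 : ∀ a ∈ l1, a.1 ≠ kv.1 := fun a ha e =>
    hnd'.2.2 a.1 (List.mem_map_of_mem ha) kv.1 List.mem_cons_self e
  have h2 : ∀ a ∈ l2, a.1 ≠ kv.1 := by
    intro a ha e
    refine hnd'.2.1.1 ?_
    rw [← e]; exact List.mem_map_of_mem ha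
  simp only [pvSweeps, List.foldl_cons, List.foldl_nil]
  rw [List.foldl_append, List.foldl_cons, pvSweep_getD_of_ne _ _ l2 _ _ _ h2]
  by_cases hp2 : PySem.Str.lower (PySem.Str.strip kv.2) ∈ (["expected", "forventet"] : List String)
  · rw [if_pos hp2, PySem.Dict.getD_insert_self]
    have hp1 : PySem.Str.lower (PySem.Str.strip kv.2) ∉ (["outlier", "ikke forventet", "not_expected", "not expected"] : List String) := by
      simp only [List.mem_cons, List.not_mem_nil, or_false] at hp2
      rcases hp2 with e | e <;> rw [e] <;> decide
    simp only [pvCatA]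
    rw [if_neg hp1, if_pos hp2]
  · rw [if_neg hp2, pvSweep_getD_of_ne _ _ l1 _ _ _ h1,
        List.foldl_append, List.foldl_cons, pvSweep_getD_of_ne _ _ l2 _ _ _ h2]
    by_cases hp1 : PySem.Str.lower (PySem.Str.strip kv.2) ∈ (["outlier", "ikke forventet", "not_expected", "not expected"] : List String)
    · rw [if_pos hp1, PySem.Dict.getD_insert_self]
      simp only [pvCatA]
      rw [if_pos hp1]
    · rw [if_neg hp1, pvSweep_getD_of_ne _ _ l1 _ _ _ h1,
          List.foldl_append, List.foldl_cons,
          pvInit_getD_of_ne l2 _ _ _ h2, PySem.Dict.getD_insert_self]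
      simp only [pvCatA]
      rw [if_neg hp1, if_neg hp2]
      split_ifs <;> rfl

-- ===== VERDICT (by name: the statement is the Claim_ definition above) =====
theorem normalize_combo_status_map_spec : Claim_equal_normalize_combo_status_map := by
  intro status_map _ hpre
  unfold Spec_normalize_combo_status_map
  cases status_map with
  | none => rfl
  | some m =>
    by_cases hm : m = []
    · simp only [normalize_combo_status_map, normalize_combo_status_map_alt, if_pos hm]
    · simp only [normalize_combo_status_map, normalize_combo_status_map_alt, if_neg hm]
      have hnd : (m.map Prod.fst).Nodup := hpre
      -- A's fold function is an insert of the cascade value.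
      have hfunA : (fun (out : PySem.Dict String String) (kv : String × String) =>
          let s := PySem.Str.lower (PySem.Str.strip kv.2)
          if s ∈ (["outlier", "ikke forventet", "not_expected", "not expected"] : List String) then
            out.insert kv.1 "outlier"
          else if s ∈ (["expected", "forventet"] : List String) then
            out.insert kv.1 "expected"
          else if s ∈ (["", "neutral", "umerket", "unmarked"] : List String) then
            out.insert kv.1 "neutral"
          else
            out.insert kv.1 "neutral")
          = (fun (out : PySem.Dict String String) (kv : String × String) => out.insert kv.1 (pvCatA kv)) := by
        funext out kv
        simp only [pvCatA]
        split_ifs <;> rfl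
      rw [hfunA]
      rw [PySem.Dict.items_foldl_insert_fresh m Prod.fst pvCatA PySem.Dict.empty
            (fun a _ => PySem.Dict.contains_empty _) hnd]
      have hkeys0 : (m.foldl (fun d kv => d.insert kv.1 "neutral")
          (PySem.Dict.empty : PySem.Dict String String)).keys = m.map Prod.fst := by
        rw [pvInit_keys]
        exact PySem.Set.ofList_eq_self_of_nodup _ hnd
      have hcont : ∀ kv ∈ m, (m.foldl (fun d kv => d.insert kv.1 "neutral")
          (PySem.Dict.empty : PySem.Dict String String)).contains kv.1 = true := by
        intro kv hkv
        rw [PySem.Dict.contains_iff_mem_keys, hkeys0]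
        exact List.mem_map_of_mem hkv
      set dB := (pvSweeps.foldl (fun d cs =>
          m.foldl (fun d kv =>
            if PySem.Str.lower (PySem.Str.strip kv.2) ∈ cs.2 then d.insert kv.1 cs.1 else d) d)
        (m.foldl (fun d kv => d.insert kv.1 "neutral") PySem.Dict.empty)) with hdB
      have hkeysB : dB.keys = m.map Prod.fst := by
        rw [hdB]
        simp only [pvSweeps, List.foldl_cons, List.foldl_nil]
        rw [pvSweep_keys _ _ m _ (fun kv hkv => ?_), pvSweep_keys _ _ m _ hcont, hkeys0]
        rw [PySem.Dict.contains_iff_mem_keys, pvSweep_keys _ _ m _ hcont, hkeys0]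
        exact List.mem_map_of_mem hkv
      have hndB : dB.keys.Nodup := hkeysB ▸ hnd
      rw [PySem.Dict.items_eq_map_keys dB hndB "", hkeysB, List.map_map,
          show (PySem.Dict.empty : PySem.Dict String String).items = [] from rfl, List.nil_append]
      refine List.map_congr_left (fun kv hkv => ?_)
      simp only [Function.comp]
      rw [hdB, pvB_getD m hnd kv hkv]
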